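-- pv_equiv track=rewrite | github.com/piebro/factorio-blueprint-visualizer | factorioBlueprintVisualizer/util.py | replace_building_generic_terms
-- ===== SOURCE A (Python) =====
-- def replace_building_generic_terms(builing_name_list, building_generic_terms):
--   new_builing_name_list = []
--   for name in builing_name_list:
--     if name in building_generic_terms:
--       new_builing_name_list.extend(replace_building_generic_terms(building_generic_terms[name], building_generic_terms))
--     else:
--       new_builing_name_list.append(name)
--   return new_builing_name_list
-- ===== SOURCE B (Python) =====
-- def replace_building_generic_terms(builing_name_list, building_generic_terms):
--   # Iterative worklist version: explicit stack instead of recursion.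
--   result = []
--   stack = list(builing_name_list)[::-1]  # top of stack = leftmost name
--   while stack:
--     name = stack.pop()
--     if name in building_generic_terms:
--       stack.extend(reversed(building_generic_terms[name]))
--     else:
--       result.append(name)
--   return result
-- ===== Notes on version B (the rewrite author's own statement) =====
-- stated objective: alternative
-- what changed: Replaces the recursive expansion with an explicit worklist/stack loop (names pushed in reverse, popped depth-first), removing recursion entirely.
import Mathlib
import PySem

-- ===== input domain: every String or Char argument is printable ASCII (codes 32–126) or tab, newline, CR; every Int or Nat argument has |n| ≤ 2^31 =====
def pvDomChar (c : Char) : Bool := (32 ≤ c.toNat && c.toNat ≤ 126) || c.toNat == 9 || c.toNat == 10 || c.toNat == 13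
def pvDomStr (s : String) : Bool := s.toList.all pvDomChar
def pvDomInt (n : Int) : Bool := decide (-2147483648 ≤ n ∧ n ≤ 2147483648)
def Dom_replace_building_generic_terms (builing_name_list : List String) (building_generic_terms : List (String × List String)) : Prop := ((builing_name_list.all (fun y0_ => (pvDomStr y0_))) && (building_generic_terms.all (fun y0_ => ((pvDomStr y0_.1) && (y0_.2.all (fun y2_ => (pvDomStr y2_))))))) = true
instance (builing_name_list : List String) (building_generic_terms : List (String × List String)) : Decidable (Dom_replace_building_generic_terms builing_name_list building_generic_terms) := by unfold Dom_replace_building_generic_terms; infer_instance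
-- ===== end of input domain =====

-- B re-implements the recursive expansion as an explicit stack/worklist loop (same output;
-- equivalence is proved on acyclic term graphs, where the Python A returns at all).

-- shared dict lookup: Python's `building_generic_terms[name]` / `name in building_generic_terms`
def pvGet (terms : List (String × List String)) (k : String) : Option (List String) :=
  (PySem.Dict.mk terms).get? k

-- ===== PORT A =====
-- literal port of A's recursion; the Nat fuel is a totality guard only (terms.length + 1
-- levels suffice on every input satisfying Pre_, see lemmas below)
def pvExpandA (terms : List (String × List String)) : Nat → List String → List String
  | 0, _ => []
  | f + 1, names =>
    names.foldl (fun acc name =>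
      match pvGet terms name with
      | some d => acc ++ pvExpandA terms f d
      | none => acc ++ [name]) []

def replace_building_generic_terms (builing_name_list : List String) (building_generic_terms : List (String × List String)) : List String :=
  pvExpandA building_generic_terms (building_generic_terms.length + 1) builing_name_list

-- ===== PORT B =====
-- fuel bound for the worklist loop: 1 + size of the (depth-limited) expansion tree of a name
def pvW (terms : List (String × List String)) : Nat → String → Nat
  | 0, _ => 1
  | f + 1, k =>
    match pvGet terms k with
    | some d => 1 + (d.map (pvW terms f)).sum
    | none => 1

-- literal port of B's while-loop; the stack is held top-first (Python's list reversed);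
-- the Nat fuel is a totality guard only (it counts loop iterations, enough under Pre_)
def pvGoB (terms : List (String × List String)) : Nat → List String → List String → List String
  | 0, _, res => res
  | _ + 1, [], res => res
  | f + 1, name :: rest, res =>
    match pvGet terms name with
    | some d => pvGoB terms f (d ++ rest) res
    | none => pvGoB terms f rest (res ++ [name])

def replace_building_generic_terms_alt (builing_name_list : List String) (building_generic_terms : List (String × List String)) : List String :=
  pvGoB building_generic_terms
    ((builing_name_list.map (pvW building_generic_terms building_generic_terms.length)).sum)
    builing_name_list []

-- ===== PRECONDITION & SPEC =====
-- one step of the key graph: the keys directly mentioned by the definitions of the keys in S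
def pvStep (terms : List (String × List String)) (S : List String) : List String :=
  (S.flatMap (fun k => (pvGet terms k).getD [])).filter (fun k => (pvGet terms k).isSome)

-- Pre_ excludes exactly the inputs with a key chain longer than the number of keys starting
-- from the input names, i.e. a definition cycle reachable from the input, on which the
-- Python A raises RecursionError.
def Pre_replace_building_generic_terms (builing_name_list : List String) (building_generic_terms : List (String × List String)) : Prop :=
  (pvStep building_generic_terms)^[building_generic_terms.length]
    (builing_name_list.filter (fun k => (pvGet building_generic_terms k).isSome)) = []

instance (builing_name_list : List String) (building_generic_terms : List (String × List String)) : Decidable (Pre_replace_building_generic_terms builing_name_list building_generic_terms) := by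
  unfold Pre_replace_building_generic_terms; infer_instance

def pvWitness_replace_building_generic_terms : List String × (List (String × List String)) :=
  (["a", "belt"], [("a", ["x", "y"]), ("b", ["a", "z"])])

def Spec_replace_building_generic_terms (builing_name_list : List String) (building_generic_terms : List (String × List String)) (out : List String) : Prop := out = replace_building_generic_terms_alt builing_name_list building_generic_terms
instance (builing_name_list : List String) (building_generic_terms : List (String × List String)) (out : List String) : Decidable (Spec_replace_building_generic_terms builing_name_list building_generic_terms out) := by unfold Spec_replace_building_generic_terms; infer_instance

-- ===== CLAIM (what is proved, stated in full; the proofs are below) =====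
def Claim_equal_replace_building_generic_terms : Prop := ∀ (builing_name_list : List String) (building_generic_terms : List (String × List String)), Dom_replace_building_generic_terms builing_name_list building_generic_terms → Pre_replace_building_generic_terms builing_name_list building_generic_terms → Spec_replace_building_generic_terms builing_name_list building_generic_terms (replace_building_generic_terms builing_name_list building_generic_terms)

-- ===== LEMMAS AND PROOFS =====

-- the (depth-limited) full expansion of one name; reference function for both ports
def pvEx (terms : List (String × List String)) : Nat → String → List String
  | 0, k => [k]
  | f + 1, k =>
    match pvGet terms k with
    | some d => d.flatMap (fun x => pvEx terms f x)
    | none => [k]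

def pvEX (terms : List (String × List String)) (k : String) : List String :=
  pvEx terms terms.length k

def pvCell (terms : List (String × List String)) (k : String) : List String :=
  match pvGet terms k with
  | some _ => [k]
  | none => []

-- "every key chain from k has length ≤ i"
def pvBnd (terms : List (String × List String)) (i : Nat) (k : String) : Prop :=
  (pvStep terms)^[i] (pvCell terms k) = []

theorem pvFlatMap_congr {α β : Type} (l : List α) (f g : α → List β)
    (h : ∀ x ∈ l, f x = g x) : l.flatMap f = l.flatMap g := by
  induction l with
  | nil => rfl
  | cons a t ih =>
    simp only [List.flatMap_cons, h a (by simp), ih (fun x hx => h x (by simp [hx]))]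

theorem pvStep_subset (terms : List (String × List String)) {S T : List String}
    (h : S ⊆ T) : pvStep terms S ⊆ pvStep terms T := by
  intro x hx
  simp only [pvStep, List.mem_filter, List.mem_flatMap] at hx ⊢
  obtain ⟨⟨k, hk, hkx⟩, hb⟩ := hx
  exact ⟨⟨k, h hk, hkx⟩, hb⟩

theorem pvStep_iterate_subset (terms : List (String × List String)) (i : Nat)
    {S T : List String} (h : S ⊆ T) :
    (pvStep terms)^[i] S ⊆ (pvStep terms)^[i] T := by
  induction i generalizing S T with
  | zero => simpa
  | succ i ih =>
    rw [Function.iterate_succ_apply, Function.iterate_succ_apply]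
    exact ih (pvStep_subset terms h)

theorem pvStep_nil (terms : List (String × List String)) : pvStep terms [] = [] := rfl

theorem pvStep_iterate_nil (terms : List (String × List String)) (i : Nat) :
    (pvStep terms)^[i] [] = [] := by
  induction i with
  | zero => rfl
  | succ i ih => rw [Function.iterate_succ_apply, pvStep_nil]; exact ih

theorem pvBnd_mono (terms : List (String × List String)) {i j : Nat} {k : String}
    (h : pvBnd terms i k) (hij : i ≤ j) : pvBnd terms j k := by
  unfold pvBnd at h ⊢
  obtain ⟨m, rfl⟩ := Nat.exists_eq_add_of_le hij
  rw [Nat.add_comm, Function.iterate_add_apply, h, pvStep_iterate_nil]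

theorem pvEx_nonkey (terms : List (String × List String)) {k : String}
    (h : pvGet terms k = none) (f : Nat) : pvEx terms f k = [k] := by
  cases f <;> simp [pvEx, h]

theorem pvBnd_key_pos (terms : List (String × List String)) {i : Nat} {k : String}
    {d : List String} (hk : pvGet terms k = some d) (h : pvBnd terms i k) : 1 ≤ i := by
  cases i with
  | zero => simp [pvBnd, pvCell, hk] at h
  | succ i => omega

theorem pvBnd_elem (terms : List (String × List String)) {i : Nat} {k k' : String}
    {d : List String} (hk : pvGet terms k = some d) (h : pvBnd terms (i + 1) k)
    (hmem : k' ∈ d) : pvBnd terms i k' := by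
  unfold pvBnd at h ⊢
  rw [Function.iterate_succ_apply] at h
  have hsub : pvCell terms k' ⊆ pvStep terms (pvCell terms k) := by
    intro x hx
    unfold pvCell at hx
    cases hget : pvGet terms k' with
    | none => simp [hget] at hx
    | some d' =>
      simp [hget] at hx
      subst hx
      simp only [pvStep, pvCell, hk, List.mem_filter, List.mem_flatMap]
      exact ⟨⟨k, by simp, by simp [hk, hmem]⟩, by simp [hget]⟩
  have := pvStep_iterate_subset terms i hsub
  rw [h] at this
  exact List.subset_nil.mp this

theorem pvEx_stable (terms : List (String × List String)) (i : Nat) :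
    ∀ (k : String) (f f' : Nat), pvBnd terms i k → i ≤ f → i ≤ f' →
      pvEx terms f k = pvEx terms f' k := by
  induction i with
  | zero =>
    intro k f f' hb _ _
    cases hget : pvGet terms k with
    | none => rw [pvEx_nonkey terms hget, pvEx_nonkey terms hget]
    | some d => exact absurd (pvBnd_key_pos terms hget hb) (by omega)
  | succ i ih =>
    intro k f f' hb hf hf'
    cases hget : pvGet terms k with
    | none => rw [pvEx_nonkey terms hget, pvEx_nonkey terms hget]
    | some d =>
      obtain ⟨a, rfl⟩ : ∃ a, f = a + 1 := ⟨f - 1, by omega⟩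
      obtain ⟨b, rfl⟩ : ∃ b, f' = b + 1 := ⟨f' - 1, by omega⟩
      simp only [pvEx, hget]
      exact pvFlatMap_congr d _ _ (fun x hx =>
        ih x a b (pvBnd_elem terms hget hb hx) (by omega) (by omega))

theorem pvEX_unfold (terms : List (String × List String)) {k : String}
    (hb : pvBnd terms terms.length k) :
    pvEX terms k =
      match pvGet terms k with
      | some d => d.flatMap (pvEX terms)
      | none => [k] := by
  cases hget : pvGet terms k with
  | none => simp [pvEX, pvEx_nonkey terms hget]
  | some d =>
    have h1 := pvBnd_key_pos terms hget hb
    obtain ⟨n', hn⟩ : ∃ n', terms.length = n' + 1 := ⟨terms.length - 1, by omega⟩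
    show pvEX terms k = d.flatMap (pvEX terms)
    calc pvEX terms k = d.flatMap (fun x => pvEx terms n' x) := by
          rw [pvEX, hn]; simp [pvEx, hget]
      _ = d.flatMap (pvEX terms) := by
          refine pvFlatMap_congr d _ _ (fun x hx => ?_)
          have hbx : pvBnd terms n' x := pvBnd_elem terms hget (hn ▸ hb) hx
          rw [pvEX, hn]
          exact pvEx_stable terms n' x n' (n' + 1) hbx (by omega) (by omega)

theorem pvBndOfPre (terms : List (String × List String)) (l : List String)
    (hpre : (pvStep terms)^[terms.length]
      (l.filter (fun k => (pvGet terms k).isSome)) = [])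
    {k : String} (hk : k ∈ l) : pvBnd terms terms.length k := by
  unfold pvBnd
  have hsub : pvCell terms k ⊆ l.filter (fun k => (pvGet terms k).isSome) := by
    intro x hx
    unfold pvCell at hx
    cases hget : pvGet terms k with
    | none => simp [hget] at hx
    | some d =>
      simp [hget] at hx; subst hx
      simp [List.mem_filter, hk, hget]
  have := pvStep_iterate_subset terms terms.length hsub
  rw [hpre] at this
  exact List.subset_nil.mp this

-- pvBnd at level terms.length is hereditary along definitions
theorem pvBnd_hered (terms : List (String × List String)) {k : String} {d : List String}
    (hget : pvGet terms k = some d) (hb : pvBnd terms terms.length k)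
    {x : String} (hx : x ∈ d) : pvBnd terms terms.length x := by
  have h1 := pvBnd_key_pos terms hget hb
  obtain ⟨n', hn⟩ : ∃ n', terms.length = n' + 1 := ⟨terms.length - 1, by omega⟩
  have := pvBnd_elem terms hget (hn ▸ hb) hx
  exact pvBnd_mono terms this (by omega)

-- A's foldl loop, unrolled to a flatMap
theorem pvExpandA_succ (terms : List (String × List String)) (f : Nat) (l : List String) :
    pvExpandA terms (f + 1) l =
      l.flatMap (fun name =>
        match pvGet terms name with
        | some d => pvExpandA terms f d
        | none => [name]) := by
  show l.foldl _ [] = _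
  have aux : ∀ (l : List String) (acc : List String),
      (l.foldl (fun acc name =>
        match pvGet terms name with
        | some d => acc ++ pvExpandA terms f d
        | none => acc ++ [name]) acc) =
      acc ++ l.flatMap (fun name =>
        match pvGet terms name with
        | some d => pvExpandA terms f d
        | none => [name]) := by
    intro l
    induction l with
    | nil => simp
    | cons a t ih =>
      intro acc
      cases hget : pvGet terms a <;> simp [List.foldl_cons, hget, ih]
  simpa using aux l []

theorem pvExpandA_eq (terms : List (String × List String)) (i : Nat) (hi : i ≤ terms.length) :
    ∀ (f : Nat) (l : List String), i ≤ f → (∀ k ∈ l, pvBnd terms i k) →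
      pvExpandA terms (f + 1) l = l.flatMap (pvEX terms) := by
  induction i with
  | zero =>
    intro f l _ hb
    rw [pvExpandA_succ]
    refine pvFlatMap_congr l _ _ (fun x hx => ?_)
    cases hget : pvGet terms x with
    | none => simp [pvEX, pvEx_nonkey terms hget]
    | some d => exact absurd (pvBnd_key_pos terms hget (hb x hx)) (by omega)
  | succ i ih =>
    intro f l hf hb
    rw [pvExpandA_succ]
    refine pvFlatMap_congr l _ _ (fun x hx => ?_)
    cases hget : pvGet terms x with
    | none => simp [pvEX, pvEx_nonkey terms hget]
    | some d =>
      obtain ⟨f'', rfl⟩ : ∃ f'', f = f'' + 1 := ⟨f - 1, by omega⟩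
      show pvExpandA terms (f'' + 1) d = pvEX terms x
      rw [ih (by omega) f'' d (by omega)
        (fun k hk => pvBnd_elem terms hget (hb x hx) hk)]
      have hEX := pvEX_unfold terms (pvBnd_mono terms (hb x hx) hi)
      simp only [hget] at hEX
      exact hEX.symm

theorem pvW_pos (terms : List (String × List String)) (f : Nat) (k : String) :
    1 ≤ pvW terms f k := by
  cases f with
  | zero => simp [pvW]
  | succ f => cases hget : pvGet terms k <;> simp [pvW, hget]

theorem pvW_stable (terms : List (String × List String)) (i : Nat) :
    ∀ (k : String) (f f' : Nat), pvBnd terms i k → i ≤ f → i ≤ f' →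
      pvW terms f k = pvW terms f' k := by
  induction i with
  | zero =>
    intro k f f' hb _ _
    cases hget : pvGet terms k with
    | none => cases f <;> cases f' <;> simp [pvW, hget]
    | some d => exact absurd (pvBnd_key_pos terms hget hb) (by omega)
  | succ i ih =>
    intro k f f' hb hf hf'
    cases hget : pvGet terms k with
    | none => cases f <;> cases f' <;> simp [pvW, hget]
    | some d =>
      obtain ⟨a, rfl⟩ : ∃ a, f = a + 1 := ⟨f - 1, by omega⟩
      obtain ⟨b, rfl⟩ : ∃ b, f' = b + 1 := ⟨f' - 1, by omega⟩
      simp only [pvW, hget]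
      congr 1
      congr 1
      exact List.map_congr_left (fun x hx =>
        ih x a b (pvBnd_elem terms hget hb hx) (by omega) (by omega))

theorem pvW_unfold (terms : List (String × List String)) {k : String} {d : List String}
    (hb : pvBnd terms terms.length k) (hget : pvGet terms k = some d) :
    pvW terms terms.length k = 1 + (d.map (pvW terms terms.length)).sum := by
  have h1 := pvBnd_key_pos terms hget hb
  obtain ⟨n', hn⟩ : ∃ n', terms.length = n' + 1 := ⟨terms.length - 1, by omega⟩
  rw [hn]
  simp only [pvW, hget]
  congr 1
  congr 1
  refine List.map_congr_left (fun x hx => ?_)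
  exact pvW_stable terms n' x n' (n' + 1) (pvBnd_elem terms hget (hn ▸ hb) hx)
    (by omega) (by omega)

theorem pvGoB_eq (terms : List (String × List String)) :
    ∀ (f : Nat) (stack res : List String),
      (∀ k ∈ stack, pvBnd terms terms.length k) →
      (stack.map (pvW terms terms.length)).sum ≤ f →
      pvGoB terms f stack res = res ++ stack.flatMap (pvEX terms) := by
  intro f
  induction f with
  | zero =>
    intro stack res _hstack hsum
    cases stack with
    | nil => simp [pvGoB]
    | cons a t =>
      exfalso
      have := pvW_pos terms terms.length a
      simp only [List.map_cons, List.sum_cons] at hsum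
      omega
  | succ f ih =>
    intro stack res hstack hsum
    cases stack with
    | nil => simp [pvGoB]
    | cons name rest =>
      simp only [List.map_cons, List.sum_cons] at hsum
      have hbname := hstack name (by simp)
      have hrest : ∀ k ∈ rest, pvBnd terms terms.length k :=
        fun k hk => hstack k (by simp [hk])
      cases hget : pvGet terms name with
      | some d =>
        have hW := pvW_unfold terms hbname hget
        have hrec := ih (d ++ rest) res
          (by
            intro k hk
            rcases List.mem_append.mp hk with hkd | hkr
            · exact pvBnd_hered terms hget hbname hkd
            · exact hrest k hkr)
          (by
            simp only [List.map_append, List.sum_append]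
            omega)
        have hEX := pvEX_unfold terms hbname
        simp only [hget] at hEX
        rw [show pvGoB terms (f + 1) (name :: rest) res = pvGoB terms f (d ++ rest) res by
          simp [pvGoB, hget]]
        rw [hrec]
        simp [List.flatMap_cons, List.flatMap_append, hEX]
      | none =>
        have hrec := ih rest (res ++ [name]) hrest (by
          have := pvW_pos terms terms.length name
          omega)
        have hEX : pvEX terms name = [name] := by simp [pvEX, pvEx_nonkey terms hget]
        rw [show pvGoB terms (f + 1) (name :: rest) res = pvGoB terms f rest (res ++ [name]) by
          simp [pvGoB, hget]]
        rw [hrec]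
        simp [List.flatMap_cons, hEX, List.append_assoc]

-- ===== VERDICT (by name: the statement is the Claim_ definition above) =====
theorem replace_building_generic_terms_spec : Claim_equal_replace_building_generic_terms := by
  intro l terms _hdom hpre
  unfold Spec_replace_building_generic_terms
  unfold replace_building_generic_terms replace_building_generic_terms_alt
  have hall : ∀ k ∈ l, pvBnd terms terms.length k :=
    fun k hk => pvBndOfPre terms l hpre hk
  rw [pvExpandA_eq terms terms.length (le_refl _) terms.length l (le_refl _) hall]
  rw [pvGoB_eq terms ((l.map (pvW terms terms.length)).sum) l [] hall (le_refl _)]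
  simp
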